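-- pv_equiv track=rewrite | github.com/LIAAD/Text2StoryPackage | text2story/core/utils.py | find_first_non_space
-- ===== SOURCE A (Python) =====
-- def find_first_non_space(s, p):
--     # Check if p is out of range
--     if p < 0 or p >= len(s):
--         return -1  # Invalid position
--
--     # Start from position p and iterate until a non-space character is found
--     while p < len(s) and s[p].isspace():
--         p += 1
--
--     # Check if we reached the end of the string without finding a non-space character
--     if p >= len(s):
--         return -1  # No non-space character found
--
--     return p  # Return the position of the first non-space character
-- ===== SOURCE B (Python) =====
-- def find_first_non_space(s, p):
--     if p < 0 or p >= len(s):
--         return -1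
--     rest = s[p:]
--     stripped = rest.lstrip()
--     if not stripped:
--         return -1
--     return p + (len(rest) - len(stripped))
-- ===== Notes on version B (the rewrite author's own statement) =====
-- stated objective: simpler
-- what changed: The explicit char-by-char while loop over isspace is replaced by slicing off s[p:], one lstrip() call and length arithmetic to recover the index.
import Mathlib
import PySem

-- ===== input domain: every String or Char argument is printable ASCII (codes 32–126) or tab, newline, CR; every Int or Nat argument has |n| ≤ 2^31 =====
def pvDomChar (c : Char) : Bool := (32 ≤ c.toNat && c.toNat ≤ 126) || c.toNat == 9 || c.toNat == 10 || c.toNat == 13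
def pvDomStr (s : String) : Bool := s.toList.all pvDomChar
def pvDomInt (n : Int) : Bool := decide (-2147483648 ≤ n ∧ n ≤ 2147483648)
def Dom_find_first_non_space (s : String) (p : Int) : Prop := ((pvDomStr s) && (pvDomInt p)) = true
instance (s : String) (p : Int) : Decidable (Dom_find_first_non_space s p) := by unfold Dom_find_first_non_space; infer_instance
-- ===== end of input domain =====

-- B replaces A's char-by-char isspace while-loop with one lstrip() on s[p:] plus length arithmetic (objective: simpler).

-- ===== PORT A =====
-- the `while p < len(s) and s[p].isspace(): p += 1` loop, step for step
def ffnsLoopA (l : List Char) (p : Nat) : Nat :=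
  if h : p < l.length then
    if PySem.Chars.isspace l[p] then ffnsLoopA l (p+1) else p
  else p
termination_by l.length - p

def find_first_non_space (s : String) (p : Int) : Int :=
  let l := s.toList
  if p < 0 ∨ (l.length : Int) ≤ p then -1
  else
    let q := ffnsLoopA l p.toNat
    if l.length ≤ q then -1 else (q : Int)

-- ===== PORT B =====
def find_first_non_space_alt (s : String) (p : Int) : Int :=
  let l := s.toList
  if p < 0 ∨ (l.length : Int) ≤ p then -1
  else
    let rest := l.drop p.toNat            -- s[p:]
    let stripped := PySem.Chars.lstrip rest  -- rest.lstrip()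
    if stripped.length = 0 then -1
    else p + ((rest.length - stripped.length : Nat) : Int)

-- ===== PRECONDITION & SPEC =====
def Spec_find_first_non_space (s : String) (p : Int) (out : Int) : Prop := out = find_first_non_space_alt s p
instance (s : String) (p : Int) (out : Int) : Decidable (Spec_find_first_non_space s p out) := by unfold Spec_find_first_non_space; infer_instance

-- ===== CLAIM (what is proved, stated in full; the proofs are below) =====
def Claim_equal_find_first_non_space : Prop := ∀ (s : String) (p : Int), Dom_find_first_non_space s p → Spec_find_first_non_space s p (find_first_non_space s p)

-- ===== LEMMAS AND PROOFS =====

theorem ffnsLoopA_eq (l : List Char) (p : Nat) (hp : p ≤ l.length) :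
    ffnsLoopA l p = p + ((l.drop p).takeWhile PySem.Chars.isspace).length := by
  by_cases hlt : p < l.length
  · rw [ffnsLoopA, dif_pos hlt]
    have hd : l.drop p = l[p] :: l.drop (p+1) := List.drop_eq_getElem_cons hlt
    by_cases hsp : PySem.Chars.isspace l[p]
    · rw [if_pos hsp, ffnsLoopA_eq l (p+1) hlt, hd, List.takeWhile_cons_of_pos hsp,
        List.length_cons]
      omega
    · rw [if_neg hsp, hd, List.takeWhile_cons_of_neg hsp]
      simp
  · have hpe : p = l.length := by omega
    subst hpe
    rw [ffnsLoopA, dif_neg hlt]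
    simp
termination_by l.length - p

theorem find_first_non_space_spec : Claim_equal_find_first_non_space := by
  intro s p _
  unfold Spec_find_first_non_space find_first_non_space find_first_non_space_alt
  set l := s.toList with hl
  by_cases hg : p < 0 ∨ (l.length : Int) ≤ p
  · simp [hg]
  · simp only [if_neg hg]
    push Not at hg
    obtain ⟨h0, hlt⟩ := hg
    have hpn : p.toNat < l.length := by omega
    have hloop := ffnsLoopA_eq l p.toNat (le_of_lt hpn)
    have hlen : (l.drop p.toNat).length = l.length - p.toNat := List.length_drop
    have hsplit : ((l.drop p.toNat).takeWhile PySem.Chars.isspace).length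
        + ((l.drop p.toNat).dropWhile PySem.Chars.isspace).length = (l.drop p.toNat).length := by
      have h := congrArg List.length
        (List.takeWhile_append_dropWhile (p := PySem.Chars.isspace) (l := l.drop p.toNat))
      rw [List.length_append] at h
      omega
    simp only [PySem.Chars.lstrip]
    by_cases hz : ((l.drop p.toNat).dropWhile PySem.Chars.isspace).length = 0
    · have : l.length ≤ ffnsLoopA l p.toNat := by omega
      simp [this, hz]
    · have hq : ¬ l.length ≤ ffnsLoopA l p.toNat := by omega
      simp only [if_neg hq, if_neg hz]
      rw [hloop]
      push_cast
      omega
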